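-- pv_equiv track=rewrite | github.com/sungikje/_algorithm | 프로그래머스/1/132267. 콜라 문제/콜라 문제.py | solution
-- ===== SOURCE A (Python) =====
-- def solution(a, b, n):
--     answer = 0
--
--
--     while True:
--         if n <= a :
--             if n == a:
--                 answer += b
--             break
--         share, rest = divmod(n,a)
--         answer += (share*b)
--         n = (share*b)+rest
--
--
--     return answer
-- ===== SOURCE B (Python) =====
-- def solution(a, b, n):
--     # Closed form: each exchange of a empties yields b colas; total colas
--     # obtained is ((n - b) // (a - b)) * b once any exchange is possible.
--     if n < a:
--         return 0
--     return ((n - b) // (a - b)) * b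
-- ===== Notes on version B (the rewrite author's own statement) =====
-- stated objective: faster
-- what changed: Replaces A's simulation loop (repeatedly divmod-ing the bottle count until it drops to a) by the O(1) closed-form formula ((n-b)//(a-b))*b.
-- outside the precondition, e.g. on solution(2, 2, 2): A returns 2, B raises ZeroDivisionError; on solution(1, -6, 8): A returns -48, B returns -12; on solution(0, 1, 5): A raises ZeroDivisionError, B returns -4
import Mathlib
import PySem

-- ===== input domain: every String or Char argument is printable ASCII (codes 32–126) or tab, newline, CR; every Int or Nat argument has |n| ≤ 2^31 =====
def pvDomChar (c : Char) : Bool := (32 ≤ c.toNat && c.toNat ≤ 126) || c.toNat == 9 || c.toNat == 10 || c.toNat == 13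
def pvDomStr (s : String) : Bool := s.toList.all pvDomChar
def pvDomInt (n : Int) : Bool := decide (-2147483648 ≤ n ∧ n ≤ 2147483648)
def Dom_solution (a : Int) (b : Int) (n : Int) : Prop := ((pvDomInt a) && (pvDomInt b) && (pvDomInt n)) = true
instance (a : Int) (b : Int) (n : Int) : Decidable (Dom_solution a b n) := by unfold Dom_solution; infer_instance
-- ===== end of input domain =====

-- B replaces A's exchange-simulation loop by the O(1) closed form ((n-b)//(a-b))*b.

-- ===== PORT A =====
-- A's 'while True' loop; the fuel only makes the recursion total (on Pre_ inputs the
-- loop variable strictly decreases, so n.toNat + 1 steps are never exhausted).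
def solutionLoop (a : Int) (b : Int) : Nat → Int → Int → Int
  | 0, _, answer => answer
  | fuel + 1, n, answer =>
    if n ≤ a then (if n = a then answer + b else answer)
    else
      let share := PySem.Int.floordiv n a
      let rest := PySem.Int.mod n a
      solutionLoop a b fuel (share * b + rest) (answer + share * b)

def solution (a : Int) (b : Int) (n : Int) : Int :=
  solutionLoop a b (n.toNat + 1) n 0

-- ===== PORT B =====
def solution_alt (a : Int) (b : Int) (n : Int) : Int :=
  if n < a then 0
  else PySem.Int.floordiv (n - b) (a - b) * b

-- ===== PRECONDITION & SPEC =====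
-- Pre_ excludes inputs with n > a yet b ≥ a or b < 0 (there A diverges, raises
-- ZeroDivisionError (a = 0), or returns values for inverted/negative exchange rates
-- outside the problem's domain which B does not match) and n = a = b (B divides by zero).
def Pre_solution (a : Int) (b : Int) (n : Int) : Prop := n < a ∨ (n = a ∧ b ≠ a) ∨ (0 ≤ b ∧ b < a)
instance (a : Int) (b : Int) (n : Int) : Decidable (Pre_solution a b n) := by unfold Pre_solution; infer_instance
def pvWitness_solution : Int × Int × Int := (3, 1, 20)

def Spec_solution (a : Int) (b : Int) (n : Int) (out : Int) : Prop := out = solution_alt a b n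
instance (a : Int) (b : Int) (n : Int) (out : Int) : Decidable (Spec_solution a b n out) := by unfold Spec_solution; infer_instance

-- ===== CLAIM (what is proved, stated in full; the proofs are below) =====
def Claim_equal_solution : Prop := ∀ (a : Int) (b : Int) (n : Int), Dom_solution a b n → Pre_solution a b n → Spec_solution a b n (solution a b n)

-- ===== LEMMAS AND PROOFS =====

-- x // x = 1 in Python for x ≠ 0 (used for the n = a case of the verdict).
lemma floordiv_self_of_ne_zero (x : Int) (hx : x ≠ 0) : PySem.Int.floordiv x x = 1 := by
  rcases lt_or_gt_of_ne hx with h | h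
  · have hneg := PySem.Int.floordiv_neg_neg (-x) (-x)
    rw [neg_neg] at hneg
    rw [hneg, PySem.Int.floordiv_eq_ediv_of_pos (by omega)]
    exact Int.ediv_self (by omega)
  · rw [PySem.Int.floordiv_eq_ediv_of_pos h]
    exact Int.ediv_self (by omega)

-- Loop invariant: with rate 0 ≤ b < a and enough fuel, the loop computes the closed form.
lemma solutionLoop_eq (a b : Int) (hb : 0 ≤ b) (hba : b < a) :
    ∀ (fuel : Nat) (m ans : Int), (m - a).toNat < fuel →
      solutionLoop a b fuel m ans =
        ans + (if m < a then 0 else PySem.Int.floordiv (m - b) (a - b) * b) := by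
  intro fuel
  induction fuel with
  | zero => intro m ans h; omega
  | succ fuel ih =>
    intro m ans h
    have hab : (0:Int) < a - b := by omega
    by_cases hm : m ≤ a
    · by_cases hma : m = a
      · subst hma
        have h1 : PySem.Int.floordiv (m - b) (m - b) = 1 := by
          rw [PySem.Int.floordiv_eq_ediv_of_pos (by omega)]
          exact Int.ediv_self (by omega)
        simp [solutionLoop, h1]
      · have : m < a := lt_of_le_of_ne hm hma
        simp [solutionLoop, hm, hma, this]
    · rw [not_le] at hm
      have ha : (0:Int) < a := by omega
      set q := PySem.Int.floordiv m a with hq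
      set r := PySem.Int.mod m a with hr
      have hqr : q * a + r = m := PySem.Int.floordiv_mul_add_mod m a
      have hr0 : 0 ≤ r := by
        rw [hr, PySem.Int.mod_eq_emod_of_pos ha]; exact Int.emod_nonneg m (by omega)
      have hrlt : r < a := by
        rw [hr, PySem.Int.mod_eq_emod_of_pos ha]; exact Int.emod_lt_of_pos m ha
      have hq1 : 1 ≤ q := by
        rw [hq, PySem.Int.le_floordiv_iff_mul_le ha]; omega
      have hqb : b ≤ q * b := le_mul_of_one_le_left hb hq1
      have hdec : q * b + r < m := by nlinarith
      -- key division identity: m - b = (q*b + r - b) + q*(a-b)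
      have hsplit : m - b = (q * b + r - b) + q * (a - b) := by ring_nf; omega
      have hdiv : PySem.Int.floordiv (m - b) (a - b)
          = PySem.Int.floordiv (q * b + r - b) (a - b) + q := by
        rw [PySem.Int.floordiv_eq_ediv_of_pos hab, PySem.Int.floordiv_eq_ediv_of_pos hab,
          hsplit]
        exact Int.add_mul_ediv_right _ q (by omega)
      have hrec := ih (q * b + r) (ans + q * b) (by omega)
      simp only [solutionLoop, if_neg (by omega : ¬ m ≤ a)]
      rw [← hq, ← hr, hrec]
      by_cases hm' : q * b + r < a
      · have h0 : PySem.Int.floordiv (q * b + r - b) (a - b) = 0 := by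
          rw [PySem.Int.floordiv_eq_ediv_of_pos hab]
          exact Int.ediv_eq_zero_of_lt (by omega) (by omega)
        rw [if_pos hm', if_neg (by omega : ¬ m < a), hdiv, h0]
        ring
      · rw [if_neg hm', if_neg (by omega : ¬ m < a), hdiv]
        ring

-- ===== VERDICT (by name: the statement is the Claim_ definition above) =====
theorem solution_spec : Claim_equal_solution := by
  intro a b n _ hpre
  unfold Spec_solution solution solution_alt
  rcases hpre with hna | ⟨hna, hb⟩ | ⟨hb, hba⟩
  · simp [solutionLoop, le_of_lt hna, hna]
    omega
  · subst hna
    simp [solutionLoop, floordiv_self_of_ne_zero (n - b) (by omega)]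
  · rw [solutionLoop_eq a b hb hba (n.toNat + 1) n 0 (by omega)]
    simp
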